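-- pv_equiv track=rewrite | github.com/erenersarac10/legalnewest | backend/parsers/structural_parsers/law_struct_parser.py | _extract_tables_in_article
-- ===== SOURCE A (Python) =====
-- from typing import Dict, List, Any, Optional, Tuple
--
-- def _extract_tables_in_article(text: str) -> List[str]:
--     """
--     Extract tables within an article (if any).
--
--     Tables are often indicated by structured data or specific keywords.
--     """
--     tables = []
--
--     # Simple heuristic: look for multiple lines with | or tab separators
--     lines = text.split('\n')
--     table_lines = []
--     in_table = False
--
--     for line in lines:
--         if '|' in line or line.count('\t') >= 2:
--             table_lines.append(line)
--             in_table = True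
--         elif in_table and line.strip():
--             # Continue if looks like continuation
--             table_lines.append(line)
--         elif in_table:
--             # End of table
--             if len(table_lines) >= 2:
--                 tables.append('\n'.join(table_lines))
--             table_lines = []
--             in_table = False
--
--     # Catch table at end
--     if len(table_lines) >= 2:
--         tables.append('\n'.join(table_lines))
--
--     return tables
-- ===== SOURCE B (Python) =====
-- from typing import List
--
-- def _is_marker(line: str) -> bool:
--     return '|' in line or line.count('\t') >= 2
--
-- def _extract_tables_in_article(text: str) -> List[str]:
--     """Two-phase: split lines into paragraphs at separator lines (blank,
--     non-marker), then in each paragraph keep the suffix from the first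
--     marker line, emitting it when it has at least 2 lines."""
--     # Phase 1: partition into paragraphs (separator = blank non-marker line)
--     paragraphs = []
--     current = []
--     for line in text.split('\n'):
--         if not _is_marker(line) and not line.strip():
--             if current:
--                 paragraphs.append(current)
--                 current = []
--         else:
--             current.append(line)
--     if current:
--         paragraphs.append(current)
--     # Phase 2: per paragraph, drop lines before the first marker; keep if >= 2
--     tables = []
--     for para in paragraphs:
--         i = 0
--         while i < len(para) and not _is_marker(para[i]):
--             i += 1
--         suffix = para[i:]
--         if len(suffix) >= 2:
--             tables.append('\n'.join(suffix))
--     return tables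
-- ===== Notes on version B (the rewrite author's own statement) =====
-- stated objective: alternative
-- what changed: Replaced A's single streaming loop with an in_table flag and mutable table_lines buffer by a two-phase decomposition: first partition the lines into paragraphs at blank non-marker lines, then for each paragraph drop the prefix before the first marker line and emit the suffix when it has at least 2 lines.
import Mathlib
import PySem

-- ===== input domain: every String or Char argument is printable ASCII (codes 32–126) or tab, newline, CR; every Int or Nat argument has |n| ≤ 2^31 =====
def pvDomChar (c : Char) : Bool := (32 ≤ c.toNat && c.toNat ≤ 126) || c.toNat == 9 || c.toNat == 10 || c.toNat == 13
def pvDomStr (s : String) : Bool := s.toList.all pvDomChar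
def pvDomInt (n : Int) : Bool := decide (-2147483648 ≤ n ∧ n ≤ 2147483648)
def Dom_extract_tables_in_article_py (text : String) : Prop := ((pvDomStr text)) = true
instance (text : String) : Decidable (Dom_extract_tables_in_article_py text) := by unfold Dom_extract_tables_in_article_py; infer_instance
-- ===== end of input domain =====

-- B replaces A's single flag-driven streaming loop by a two-phase decomposition
-- (partition lines into paragraphs at blank non-marker lines, then per paragraph
-- keep the suffix from the first marker line); objective: alternative, same cost.

-- text.split('\n')  (shared by both ports; separator is the nonempty "\n")
def pvLines (text : String) : List String :=
  (PySem.Chars.splitOn text.toList "\n".toList).map String.ofList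

-- ===== PORT A =====
-- A's single loop over the lines, state (tables, table_lines, in_table), branches in Python order.
def pvLoopA : List String → List String → List String → Bool → List String
  | [], tables, tl, _inT =>
      -- catch table at end
      if 2 ≤ tl.length then tables ++ [PySem.Str.join "\n" tl] else tables
  | line :: rest, tables, tl, inT =>
      if PySem.Str.isIn "|" line || decide (2 ≤ PySem.Str.count line "\t") then
        pvLoopA rest tables (tl ++ [line]) true
      else if inT && !(PySem.Str.strip line == "") then
        pvLoopA rest tables (tl ++ [line]) inT
      else if inT then
        pvLoopA rest (if 2 ≤ tl.length then tables ++ [PySem.Str.join "\n" tl] else tables) [] false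
      else
        pvLoopA rest tables tl inT

def extract_tables_in_article_py (text : String) : List String :=
  pvLoopA (pvLines text) [] [] false

-- ===== PORT B =====
-- `_is_marker` of Source B
def pvMarker (line : String) : Bool :=
  PySem.Str.isIn "|" line || decide (2 ≤ PySem.Str.count line "\t")

-- phase 1 of Source B: partition the lines into paragraphs at blank non-marker lines
def pvGroups : List String → List String → List (List String)
  | cur, [] => if cur.isEmpty then [] else [cur]
  | cur, line :: rest =>
      if !pvMarker line && PySem.Str.strip line == "" then
        if cur.isEmpty then pvGroups [] rest else cur :: pvGroups [] rest
      else
        pvGroups (cur ++ [line]) rest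

-- phase 2 of Source B, per paragraph: the while-loop advancing i past non-marker lines is dropWhile
def pvTableOf (para : List String) : Option String :=
  let suffix := para.dropWhile (fun l => !pvMarker l)
  if 2 ≤ suffix.length then some (PySem.Str.join "\n" suffix) else none

def extract_tables_in_article_py_alt (text : String) : List String :=
  (pvGroups [] (pvLines text)).filterMap pvTableOf

-- ===== PRECONDITION & SPEC =====
def Spec_extract_tables_in_article_py (text : String) (out : List String) : Prop := out = extract_tables_in_article_py_alt text
instance (text : String) (out : List String) : Decidable (Spec_extract_tables_in_article_py text out) := by unfold Spec_extract_tables_in_article_py; infer_instance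

-- ===== CLAIM (what is proved, stated in full; the proofs are below) =====
def Claim_equal_extract_tables_in_article_py : Prop := ∀ (text : String), Dom_extract_tables_in_article_py text → Spec_extract_tables_in_article_py text (extract_tables_in_article_py text)

-- ===== LEMMAS AND PROOFS =====

-- Invariant: running A's loop from a state reconstructible from B's current paragraph
-- `cur` (table_lines = suffix of cur from its first marker, in_table = cur has a marker)
-- produces the already-emitted tables plus B's outputs for the remaining paragraphs.
lemma pvLoopA_eq_groups (ls : List String) : ∀ (cur tables : List String),
    pvLoopA ls tables (cur.dropWhile (fun l => !pvMarker l)) (cur.any pvMarker)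
      = tables ++ (pvGroups cur ls).filterMap pvTableOf := by
  have hA : ∀ line : String,
      (PySem.Str.isIn "|" line || decide (2 ≤ PySem.Str.count line "\t")) = pvMarker line :=
    fun _ => rfl
  induction ls with
  | nil =>
    intro cur tables
    by_cases hc : cur = []
    · subst hc; simp [pvLoopA, pvGroups]
    · simp only [pvGroups, List.isEmpty_eq_false_iff.mpr hc, Bool.false_eq_true, if_false,
        List.filterMap, pvTableOf, pvLoopA]
      split_ifs with h <;> simp_all
  | cons line rest ih =>
    intro cur tables
    by_cases hm : pvMarker line = true
    · -- marker line: A appends it and sets in_table; B keeps it in the paragraph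
      have hdw : (cur ++ [line]).dropWhile (fun l => !pvMarker l)
          = cur.dropWhile (fun l => !pvMarker l) ++ [line] := by
        rw [List.dropWhile_append]
        by_cases he : (cur.dropWhile (fun l => !pvMarker l)).isEmpty
        · rw [if_pos he, List.isEmpty_iff.mp he, List.nil_append]
          simp [List.dropWhile, hm]
        · rw [if_neg he]
      have hany' : (cur ++ [line]).any pvMarker = true := by
        simp [List.any_append, hm]
      simp only [pvLoopA, hA, hm, if_true]
      have hgr : pvGroups cur (line :: rest) = pvGroups (cur ++ [line]) rest := by
        simp [pvGroups, hm]
      rw [hgr, ← hdw]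
      have := ih (cur ++ [line]) tables
      rwa [hany'] at this
    · have hmf : pvMarker line = false := by simpa using hm
      by_cases hb : (PySem.Str.strip line == "") = true
      · -- separator line (blank, non-marker)
        by_cases hc : cur = []
        · subst hc
          simp only [pvLoopA, hA, hmf, Bool.false_eq_true, if_false, List.any_nil,
            Bool.false_and, List.dropWhile_nil]
          have hgr : pvGroups [] (line :: rest) = pvGroups [] rest := by
            simp [pvGroups, hmf, hb]
          rw [hgr]
          simpa using ih [] tables
        · have hgr : pvGroups cur (line :: rest) = cur :: pvGroups [] rest := by
            simp [pvGroups, hmf, hb, List.isEmpty_eq_false_iff.mpr hc]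
          by_cases hany : cur.any pvMarker = true
          · -- A flushes its block; B emits pvTableOf cur for this paragraph
            simp only [pvLoopA, hA, hmf, Bool.false_eq_true, if_false, hany, hb,
              Bool.not_true, Bool.and_false, if_true]
            rw [hgr]
            simp only [List.filterMap, pvTableOf]
            split_ifs with h2
            · have := ih [] (tables ++ [PySem.Str.join "\n"
                (cur.dropWhile (fun l => !pvMarker l))])
              simpa [List.append_assoc] using this
            · simpa using ih [] tables
          · -- paragraph without marker: A never entered a table; B emits nothing for it
            have hne : cur.any pvMarker = false := by simpa using hany
            have hdw0 : cur.dropWhile (fun l => !pvMarker l) = [] := by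
              apply List.dropWhile_eq_nil_iff.mpr
              intro x hx
              by_contra h
              exact hany (List.any_eq_true.mpr ⟨x, hx, by simpa using h⟩)
            simp only [pvLoopA, hA, hmf, Bool.false_eq_true, if_false, hne, hdw0,
              Bool.false_and]
            rw [hgr]
            simp only [List.filterMap, pvTableOf, hdw0]
            norm_num
            simpa using ih [] tables
      · -- non-blank non-marker line: continuation iff in_table; B keeps it in the paragraph
        have hbf : (PySem.Str.strip line == "") = false := by simpa using hb
        have hgr : pvGroups cur (line :: rest) = pvGroups (cur ++ [line]) rest := by
          simp [pvGroups, hbf]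
        by_cases hany : cur.any pvMarker = true
        · have hdw : (cur ++ [line]).dropWhile (fun l => !pvMarker l)
              = cur.dropWhile (fun l => !pvMarker l) ++ [line] := by
            rw [List.dropWhile_append, if_neg]
            intro he
            rcases List.any_eq_true.mp hany with ⟨x, hx, hpx⟩
            have := List.dropWhile_eq_nil_iff.mp (List.isEmpty_iff.mp he) x hx
            simp [hpx] at this
          have hany' : (cur ++ [line]).any pvMarker = true := by
            simp [List.any_append, hany]
          simp only [pvLoopA, hA, hmf, Bool.false_eq_true, if_false, hany, hbf,
            Bool.not_false, Bool.and_true, if_true]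
          rw [hgr, ← hdw]
          have := ih (cur ++ [line]) tables
          rwa [hany'] at this
        · have hne : cur.any pvMarker = false := by simpa using hany
          have hdw0 : cur.dropWhile (fun l => !pvMarker l) = [] := by
            apply List.dropWhile_eq_nil_iff.mpr
            intro x hx
            by_contra h
            exact hany (List.any_eq_true.mpr ⟨x, hx, by simpa using h⟩)
          have hdw : (cur ++ [line]).dropWhile (fun l => !pvMarker l) = [] := by
            apply List.dropWhile_eq_nil_iff.mpr
            intro x hx
            rcases List.mem_append.mp hx with h | h
            · exact List.dropWhile_eq_nil_iff.mp hdw0 x h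
            · simp at h; subst h; simp [hmf]
          have hany' : (cur ++ [line]).any pvMarker = false := by
            simp [List.any_append, hne, hmf]
          simp only [pvLoopA, hA, hmf, Bool.false_eq_true, if_false, hne, hdw0,
            Bool.false_and]
          rw [hgr]
          have := ih (cur ++ [line]) tables
          rw [hdw, hany'] at this
          exact this

-- ===== VERDICT (by name: the statement is the Claim_ definition above) =====
theorem extract_tables_in_article_py_spec : Claim_equal_extract_tables_in_article_py := by
  intro text _hdom
  show extract_tables_in_article_py text = extract_tables_in_article_py_alt text
  unfold extract_tables_in_article_py extract_tables_in_article_py_alt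
  simpa using pvLoopA_eq_groups (pvLines text) [] []
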